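-- pv_equiv track=rewrite | github.com/CodeBlackwell/C.R.A.C.K. | crack/db/neo4j-migration/scripts/_archive/migration_nov24/analyze_missing_commands_v2.py | categorize_with_preservation
-- ===== SOURCE A (Python) =====
-- def categorize_with_preservation(text: str) -> tuple[str, str, str]:
--     """
--     Categorize a failed mapping with preservation strategy.
--     Returns: (category, action, preservation_note)
--     """
--     text_lower = text.lower()
--
--     # HTML/XSS payloads - CREATE as payload commands
--     if text.startswith('<') and '>' in text and any(x in text_lower for x in ['onload', 'onerror', 'svg', 'script']):
--         return ('payload_html', 'CREATE_PAYLOAD_CMD', 'Create XSS test command with payload in command field')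
--
--     # Instructions with embedded commands - EXTRACT command
--     if text_lower.startswith(('manual ', 'check ')) and any(x in text for x in [':', '- ']):
--         return ('instruction_with_cmd', 'EXTRACT_COMMAND', 'Extract embedded command and create entry')
--
--     # Code snippets - CREATE as example/alternative
--     if any(x in text for x in ['()', 'import ', 'def ', 'class ']):
--         if any(lang in text_lower for lang in ['python', 'ruby', 'perl', 'php']):
--             return ('code_snippet', 'CREATE_EXAMPLE_CMD', 'Create command entry for language-specific alternative')
--
--     # URLs - CREATE as reference command or move to notes
--     if text.startswith(('http://', 'https://', 'www.')):
--         return ('url', 'ADD_TO_REFERENCES', 'Add to references field of related command')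
--
--     # State conditions - CREATE verification commands
--     if any(x in text_lower for x in ['obtained', 'available', 'installed', 'running', 'imported']):
--         if not text.startswith(('import ', 'Install ', 'run ')):
--             return ('state_condition', 'CREATE_VERIFY_CMD', 'Create verification/check command')
--
--     # PowerShell module imports - HIGH PRIORITY
--     if 'Import' in text and any(x in text for x in ['PowerView', 'SharpHound', 'Mimikatz', 'PowerUp']):
--         return ('powershell_import', 'CREATE_IMPORT_CMD', 'Create PowerShell import command')
--
--     # Get-* PowerShell cmdlets - HIGH PRIORITY
--     if text.startswith('Get-') or 'Get-' in text:
--         return ('powershell_cmdlet', 'CREATE_PS_CMD', 'Create PowerShell cmdlet command')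
--
--     # Tool name + action description - EXTRACT and create
--     if any(tool in text_lower for tool in ['nessus', 'burp', 'wfuzz', 'wpscan']) and ' ' in text:
--         return ('tool_with_action', 'CREATE_TOOL_CMD', 'Create command for tool with action')
--
--     # Simple tool name - NEEDS CONTEXT (check where it's referenced)
--     if len(text.split()) == 1 and text.islower() and text.isalpha():
--         return ('tool_name_only', 'CHECK_CONTEXT', 'Check file context to determine action')
--
--     # Transfer/setup instructions - CREATE setup command
--     if any(x in text_lower for x in ['transfer ', 'copy ', 'download ', 'upload ']):
--         return ('transfer_instruction', 'CREATE_TRANSFER_CMD', 'Create file transfer command')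
--
--     # chmod/permission commands - CREATE utility command
--     if 'chmod' in text_lower or 'chown' in text_lower:
--         return ('permission_cmd', 'CREATE_UTILITY_CMD', 'Create permission management command')
--
--     # Command with full syntax - CREATE directly
--     if any(x in text for x in ['<', '>', '-', '/', '|']):
--         return ('command_full', 'CREATE_FULL_CMD', 'Create complete command entry')
--
--     # Default: needs manual review but preserve
--     return ('unknown', 'MANUAL_REVIEW_PRESERVE', 'Review and determine best preservation method')
-- ===== SOURCE B (Python) =====
-- # Declarative rule specs interpreted by one generic matcher; the answer is built
-- # back-to-front by folding the (rule, result) pairs in reverse, keeping the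
-- # earliest (highest-priority) match in an accumulator.
--
-- # rule spec: (any_prefixes, forbidden_text_prefixes, required_substrings,
-- #             any_of_groups, single_lower_word)
-- # each needle is (use_lowercased_text, needle)
-- RULES = [
--     ([(False, '<')], [], [(False, '>')],
--      [[(True, 'onload'), (True, 'onerror'), (True, 'svg'), (True, 'script')]], False),
--     ([(True, 'manual '), (True, 'check ')], [], [],
--      [[(False, ':'), (False, '- ')]], False),
--     ([], [], [],
--      [[(False, '()'), (False, 'import '), (False, 'def '), (False, 'class ')],
--       [(True, 'python'), (True, 'ruby'), (True, 'perl'), (True, 'php')]], False),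
--     ([(False, 'http://'), (False, 'https://'), (False, 'www.')], [], [], [], False),
--     ([], ['import ', 'Install ', 'run '], [],
--      [[(True, 'obtained'), (True, 'available'), (True, 'installed'),
--        (True, 'running'), (True, 'imported')]], False),
--     ([], [], [(False, 'Import')],
--      [[(False, 'PowerView'), (False, 'SharpHound'), (False, 'Mimikatz'), (False, 'PowerUp')]], False),
--     # startswith('Get-') is subsumed by 'Get-' in text
--     ([], [], [], [[(False, 'Get-')]], False),
--     ([], [], [],
--      [[(True, 'nessus'), (True, 'burp'), (True, 'wfuzz'), (True, 'wpscan')],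
--       [(False, ' ')]], False),
--     ([], [], [], [], True),
--     ([], [], [],
--      [[(True, 'transfer '), (True, 'copy '), (True, 'download '), (True, 'upload ')]], False),
--     ([], [], [], [[(True, 'chmod'), (True, 'chown')]], False),
--     ([], [], [],
--      [[(False, '<'), (False, '>'), (False, '-'), (False, '/'), (False, '|')]], False),
-- ]
--
-- RESULTS = [
--     ('payload_html', 'CREATE_PAYLOAD_CMD', 'Create XSS test command with payload in command field'),
--     ('instruction_with_cmd', 'EXTRACT_COMMAND', 'Extract embedded command and create entry'),
--     ('code_snippet', 'CREATE_EXAMPLE_CMD', 'Create command entry for language-specific alternative'),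
--     ('url', 'ADD_TO_REFERENCES', 'Add to references field of related command'),
--     ('state_condition', 'CREATE_VERIFY_CMD', 'Create verification/check command'),
--     ('powershell_import', 'CREATE_IMPORT_CMD', 'Create PowerShell import command'),
--     ('powershell_cmdlet', 'CREATE_PS_CMD', 'Create PowerShell cmdlet command'),
--     ('tool_with_action', 'CREATE_TOOL_CMD', 'Create command for tool with action'),
--     ('tool_name_only', 'CHECK_CONTEXT', 'Check file context to determine action'),
--     ('transfer_instruction', 'CREATE_TRANSFER_CMD', 'Create file transfer command'),
--     ('permission_cmd', 'CREATE_UTILITY_CMD', 'Create permission management command'),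
--     ('command_full', 'CREATE_FULL_CMD', 'Create complete command entry'),
-- ]
--
--
-- def _matches(rule, text, tl):
--     prefs, negs, subs, groups, single = rule
--
--     def src(use_lower):
--         return tl if use_lower else text
--
--     return ((not prefs or any(src(w).startswith(p) for w, p in prefs))
--             and all(n in src(w) for w, n in subs)
--             and all(any(n in src(w) for w, n in g) for g in groups)
--             and not any(text.startswith(p) for p in negs)
--             and (not single or (len(text.split()) == 1
--                                 and text.islower() and text.isalpha())))
--
--
-- def categorize_with_preservation(text: str) -> tuple[str, str, str]:
--     tl = text.lower()
--     best = ('unknown', 'MANUAL_REVIEW_PRESERVE',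
--             'Review and determine best preservation method')
--     for rule, result in reversed(list(zip(RULES, RESULTS))):
--         if _matches(rule, text, tl):
--             best = result
--     return best
-- ===== Notes on version B (the rewrite author's own statement) =====
-- stated objective: alternative
-- what changed: Replaced the hard-coded 13-branch early-return if-chain by a declarative table of rule specifications (prefix/substring/any-of-group needles as data) evaluated by one generic matcher, with the answer built back-to-front: a reverse fold over the (rule, result) pairs overwrites an accumulator so the highest-priority match survives, instead of forward short-circuit returns.
import Mathlib
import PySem

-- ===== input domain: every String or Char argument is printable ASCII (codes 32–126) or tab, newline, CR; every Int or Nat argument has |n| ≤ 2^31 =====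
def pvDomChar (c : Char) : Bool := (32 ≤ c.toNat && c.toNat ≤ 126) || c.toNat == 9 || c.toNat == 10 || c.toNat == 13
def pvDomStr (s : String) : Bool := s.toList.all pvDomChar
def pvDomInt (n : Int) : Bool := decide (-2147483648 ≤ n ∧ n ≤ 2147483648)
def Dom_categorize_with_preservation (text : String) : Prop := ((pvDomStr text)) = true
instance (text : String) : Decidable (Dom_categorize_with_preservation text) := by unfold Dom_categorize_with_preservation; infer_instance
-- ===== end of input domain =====

-- B replaces A's hard-coded early-return if-chain by a declarative rule table interpreted
-- by one generic matcher, folded in reverse so the highest-priority match wins (alternative; same cost).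

-- ===== PORT A =====
-- Python str.islower(): at least one cased character and no uppercase one — exact on the ASCII domain,
-- where the cased characters are exactly the letters.
def pyIslower (s : String) : Bool :=
  s.toList.any PySem.Chars.islower && s.toList.all (fun c => !(PySem.Chars.isupper c))

def categorize_with_preservation (text : String) : String × String × String :=
  let tl := PySem.Str.lower text
  if PySem.Str.startswith text "<" && PySem.Str.isIn ">" text &&
     (PySem.Str.isIn "onload" tl || PySem.Str.isIn "onerror" tl || PySem.Str.isIn "svg" tl || PySem.Str.isIn "script" tl) then
    ("payload_html", "CREATE_PAYLOAD_CMD", "Create XSS test command with payload in command field")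
  else if (PySem.Str.startswith tl "manual " || PySem.Str.startswith tl "check ") &&
          (PySem.Str.isIn ":" text || PySem.Str.isIn "- " text) then
    ("instruction_with_cmd", "EXTRACT_COMMAND", "Extract embedded command and create entry")
  else
    -- Python falls through the outer 'code snippet' if when the inner language test fails: 'rest' is the continuation
    let rest :=
      if PySem.Str.startswith text "http://" || PySem.Str.startswith text "https://" || PySem.Str.startswith text "www." then
        ("url", "ADD_TO_REFERENCES", "Add to references field of related command")
      else
        let rest2 :=
          if PySem.Str.isIn "Import" text &&
             (PySem.Str.isIn "PowerView" text || PySem.Str.isIn "SharpHound" text || PySem.Str.isIn "Mimikatz" text || PySem.Str.isIn "PowerUp" text) then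
            ("powershell_import", "CREATE_IMPORT_CMD", "Create PowerShell import command")
          else if PySem.Str.startswith text "Get-" || PySem.Str.isIn "Get-" text then
            ("powershell_cmdlet", "CREATE_PS_CMD", "Create PowerShell cmdlet command")
          else if (PySem.Str.isIn "nessus" tl || PySem.Str.isIn "burp" tl || PySem.Str.isIn "wfuzz" tl || PySem.Str.isIn "wpscan" tl) &&
                  PySem.Str.isIn " " text then
            ("tool_with_action", "CREATE_TOOL_CMD", "Create command for tool with action")
          else if (PySem.Str.split₀ text).length == 1 && pyIslower text && PySem.Str.strIsalpha text then
            ("tool_name_only", "CHECK_CONTEXT", "Check file context to determine action")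
          else if PySem.Str.isIn "transfer " tl || PySem.Str.isIn "copy " tl || PySem.Str.isIn "download " tl || PySem.Str.isIn "upload " tl then
            ("transfer_instruction", "CREATE_TRANSFER_CMD", "Create file transfer command")
          else if PySem.Str.isIn "chmod" tl || PySem.Str.isIn "chown" tl then
            ("permission_cmd", "CREATE_UTILITY_CMD", "Create permission management command")
          else if PySem.Str.isIn "<" text || PySem.Str.isIn ">" text || PySem.Str.isIn "-" text || PySem.Str.isIn "/" text || PySem.Str.isIn "|" text then
            ("command_full", "CREATE_FULL_CMD", "Create complete command entry")
          else
            ("unknown", "MANUAL_REVIEW_PRESERVE", "Review and determine best preservation method")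
        -- nested 'state condition' case: matching outer but failing inner falls through to rest2
        if PySem.Str.isIn "obtained" tl || PySem.Str.isIn "available" tl || PySem.Str.isIn "installed" tl || PySem.Str.isIn "running" tl || PySem.Str.isIn "imported" tl then
          if !(PySem.Str.startswith text "import " || PySem.Str.startswith text "Install " || PySem.Str.startswith text "run ") then
            ("state_condition", "CREATE_VERIFY_CMD", "Create verification/check command")
          else rest2
        else rest2
    -- nested 'code snippet' case: matching outer but failing inner falls through to rest
    if PySem.Str.isIn "()" text || PySem.Str.isIn "import " text || PySem.Str.isIn "def " text || PySem.Str.isIn "class " text then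
      if PySem.Str.isIn "python" tl || PySem.Str.isIn "ruby" tl || PySem.Str.isIn "perl" tl || PySem.Str.isIn "php" tl then
        ("code_snippet", "CREATE_EXAMPLE_CMD", "Create command entry for language-specific alternative")
      else rest
    else rest

-- ===== PORT B =====
-- Source B's declarative rule spec: (any-of prefixes, forbidden text prefixes, required substrings,
-- any-of needle groups, single-lower-word flag); each needle is (use_lowercased_text, needle).
structure PvRule where
  prefs : List (Bool × String)
  negs : List String
  subs : List (Bool × String)
  groups : List (List (Bool × String))
  single : Bool

def pvSrc (text tl : String) (w : Bool) : String := if w then tl else text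

-- Source B's _matches
def pvMatches (r : PvRule) (text tl : String) : Bool :=
  (r.prefs.isEmpty || r.prefs.any (fun p => PySem.Str.startswith (pvSrc text tl p.1) p.2)) &&
  r.subs.all (fun s => PySem.Str.isIn s.2 (pvSrc text tl s.1)) &&
  r.groups.all (fun g => g.any (fun s => PySem.Str.isIn s.2 (pvSrc text tl s.1))) &&
  !(r.negs.any (fun p => PySem.Str.startswith text p)) &&
  (!r.single || ((PySem.Str.split₀ text).length == 1 && pyIslower text && PySem.Str.strIsalpha text))

def pvRulesTable : List PvRule :=
  [ ⟨[(false, "<")], [], [(false, ">")],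
      [[(true, "onload"), (true, "onerror"), (true, "svg"), (true, "script")]], false⟩,
    ⟨[(true, "manual "), (true, "check ")], [], [],
      [[(false, ":"), (false, "- ")]], false⟩,
    ⟨[], [], [],
      [[(false, "()"), (false, "import "), (false, "def "), (false, "class ")],
       [(true, "python"), (true, "ruby"), (true, "perl"), (true, "php")]], false⟩,
    ⟨[(false, "http://"), (false, "https://"), (false, "www.")], [], [], [], false⟩,
    ⟨[], ["import ", "Install ", "run "], [],
      [[(true, "obtained"), (true, "available"), (true, "installed"),
        (true, "running"), (true, "imported")]], false⟩,
    ⟨[], [], [(false, "Import")],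
      [[(false, "PowerView"), (false, "SharpHound"), (false, "Mimikatz"), (false, "PowerUp")]], false⟩,
    ⟨[], [], [], [[(false, "Get-")]], false⟩,
    ⟨[], [], [],
      [[(true, "nessus"), (true, "burp"), (true, "wfuzz"), (true, "wpscan")],
       [(false, " ")]], false⟩,
    ⟨[], [], [], [], true⟩,
    ⟨[], [], [],
      [[(true, "transfer "), (true, "copy "), (true, "download "), (true, "upload ")]], false⟩,
    ⟨[], [], [], [[(true, "chmod"), (true, "chown")]], false⟩,
    ⟨[], [], [],
      [[(false, "<"), (false, ">"), (false, "-"), (false, "/"), (false, "|")]], false⟩ ]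

def pvResults : List (String × String × String) :=
  [ ("payload_html", "CREATE_PAYLOAD_CMD", "Create XSS test command with payload in command field"),
    ("instruction_with_cmd", "EXTRACT_COMMAND", "Extract embedded command and create entry"),
    ("code_snippet", "CREATE_EXAMPLE_CMD", "Create command entry for language-specific alternative"),
    ("url", "ADD_TO_REFERENCES", "Add to references field of related command"),
    ("state_condition", "CREATE_VERIFY_CMD", "Create verification/check command"),
    ("powershell_import", "CREATE_IMPORT_CMD", "Create PowerShell import command"),
    ("powershell_cmdlet", "CREATE_PS_CMD", "Create PowerShell cmdlet command"),
    ("tool_with_action", "CREATE_TOOL_CMD", "Create command for tool with action"),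
    ("tool_name_only", "CHECK_CONTEXT", "Check file context to determine action"),
    ("transfer_instruction", "CREATE_TRANSFER_CMD", "Create file transfer command"),
    ("permission_cmd", "CREATE_UTILITY_CMD", "Create permission management command"),
    ("command_full", "CREATE_FULL_CMD", "Create complete command entry") ]

-- Source B's reverse fold: the accumulator keeps the result of the earliest matching rule
def categorize_with_preservation_alt (text : String) : String × String × String :=
  let tl := PySem.Str.lower text
  ((pvRulesTable.zip pvResults).reverse).foldl
    (fun best p => if pvMatches p.1 text tl then p.2 else best)
    ("unknown", "MANUAL_REVIEW_PRESERVE", "Review and determine best preservation method")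

-- ===== PRECONDITION & SPEC =====
def Spec_categorize_with_preservation (text : String) (out : String × String × String) : Prop := out = categorize_with_preservation_alt text
instance (text : String) (out : String × String × String) : Decidable (Spec_categorize_with_preservation text out) := by unfold Spec_categorize_with_preservation; infer_instance

-- ===== CLAIM =====
def Claim_equal_categorize_with_preservation : Prop := ∀ (text : String), Dom_categorize_with_preservation text → Spec_categorize_with_preservation text (categorize_with_preservation text)

-- ===== LEMMAS AND PROOFS =====
-- 'if a && b then x else y' is A's nested fallthrough 'if a then (if b then x else y) else y'
theorem pv_if_and {α : Type} (a b : Bool) (x y : α) :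
    (if a && b then x else y) = if a then (if b then x else y) else y := by
  cases a <;> cases b <;> simp

theorem pvSrc_true (text tl : String) : pvSrc text tl true = tl := rfl
theorem pvSrc_false (text tl : String) : pvSrc text tl false = text := rfl

-- A's 'startswith Get- or Get- in text' collapses to the substring test alone
theorem pv_get_dash (s : String) :
    (PySem.Str.startswith s "Get-" || PySem.Str.isIn "Get-" s) = PySem.Str.isIn "Get-" s := by
  cases h : PySem.Str.startswith s "Get-" <;> simp
  have hp : ("Get-" : String).toList <+: s.toList :=
    (PySem.Chars.startswith_iff s.toList ("Get-" : String).toList).mp (by simpa using h)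
  exact (PySem.Chars.isIn_iff_infix _ _).mpr (by simpa using hp.isInfix)

-- ===== VERDICT =====
theorem categorize_with_preservation_spec : Claim_equal_categorize_with_preservation := by
  intro text _
  show categorize_with_preservation text = categorize_with_preservation_alt text
  unfold categorize_with_preservation categorize_with_preservation_alt pvRulesTable pvResults
  simp only [List.zip, List.zipWith, List.reverse_cons, List.reverse_nil, List.nil_append,
    List.cons_append, List.foldl_cons, List.foldl_nil,
    pvMatches, pvSrc_true, pvSrc_false, List.any_cons, List.any_nil, List.all_cons, List.all_nil,
    List.isEmpty_cons, List.isEmpty_nil,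
    Bool.or_false, Bool.and_true, Bool.not_false, Bool.false_or, Bool.true_or, Bool.not_true,
    Bool.or_assoc, Bool.and_assoc, pv_get_dash, pv_if_and, if_true, if_false, reduceIte]
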